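-- pv_equiv track=rewrite | github.com/renta0426/NVIDIA-Nemotron-Model-Reasoning-Challenge | cuda-train-data-analysis-v1/code/train_data_analysis_v1.py | glyph_output_order_acyclic
-- ===== SOURCE A (Python) =====
-- from collections import Counter, defaultdict
--
-- def glyph_output_order_acyclic(examples: list[tuple[str, str]]) -> bool:
--     outputs = [target for _, target in examples if target]
--     nodes = sorted({char for output in outputs for char in output})
--     if not nodes:
--         return False
--     edges: dict[str, set[str]] = defaultdict(set)
--     indegree = {node: 0 for node in nodes}
--     for output in outputs:
--         for left_index in range(len(output)):
--             for right_index in range(left_index + 1, len(output)):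
--                 left_char = output[left_index]
--                 right_char = output[right_index]
--                 if left_char == right_char or right_char in edges[left_char]:
--                     continue
--                 edges[left_char].add(right_char)
--                 indegree[right_char] += 1
--     queue = [node for node, degree in indegree.items() if degree == 0]
--     visited = 0
--     while queue:
--         node = queue.pop()
--         visited += 1
--         for neighbor in edges[node]:
--             indegree[neighbor] -= 1
--             if indegree[neighbor] == 0:
--                 queue.append(neighbor)
--     return visited == len(nodes)
-- ===== SOURCE B (Python) =====
-- def glyph_output_order_acyclic(examples: list[tuple[str, str]]) -> bool:
--     # Edge a -> b iff, in some non-empty target, some occurrence of a precedes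
--     # some occurrence of b (a != b) -- equivalently first[a] < last[b].
--     preds = {}  # node -> set of its predecessors
--     for _, target in examples:
--         if not target:
--             continue
--         first = {}
--         last = {}
--         for i, c in enumerate(target):
--             if c not in first:
--                 first[c] = i
--             last[c] = i
--         for a, fa in first.items():
--             for b, lb in last.items():
--                 if a != b and fa < lb:
--                     preds.setdefault(b, set()).add(a)
--             preds.setdefault(a, set())
--     if not preds:
--         return False
--     # Acyclic iff no non-empty set of nodes in which every node has a
--     # predecessor inside the set: greatest fixpoint by elimination.
--     remaining = set(preds)
--     while True:
--         keep = {v for v in remaining if preds[v] & remaining}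
--         if len(keep) == len(remaining):
--             return not remaining
--         remaining = keep
-- ===== Notes on version B (the rewrite author's own statement) =====
-- stated objective: faster
-- what changed: Edges are derived from per-output first/last occurrence indices (first[a] < last[b]) instead of scanning all O(len^2) index pairs, and acyclicity is decided by iterated elimination of nodes with no predecessor in the remaining set (a greatest-fixpoint computation) instead of an indegree-queue Kahn traversal.
import Mathlib
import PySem

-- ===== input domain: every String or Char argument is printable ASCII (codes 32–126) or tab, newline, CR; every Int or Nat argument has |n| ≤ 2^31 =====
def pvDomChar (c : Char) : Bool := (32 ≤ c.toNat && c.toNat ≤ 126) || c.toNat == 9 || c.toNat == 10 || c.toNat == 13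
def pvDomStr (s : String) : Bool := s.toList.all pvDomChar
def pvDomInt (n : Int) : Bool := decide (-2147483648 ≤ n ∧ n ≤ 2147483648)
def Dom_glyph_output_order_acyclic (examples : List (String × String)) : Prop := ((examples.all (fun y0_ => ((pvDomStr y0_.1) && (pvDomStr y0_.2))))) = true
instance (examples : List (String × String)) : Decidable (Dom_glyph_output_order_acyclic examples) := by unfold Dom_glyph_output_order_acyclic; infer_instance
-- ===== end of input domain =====

-- B builds edges from per-output first/last occurrence indices instead of all index pairs, and
-- decides acyclicity by iterated elimination of nodes with no predecessor in the remaining set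
-- instead of an indegree-queue Kahn traversal (objective: faster).

-- ===== PORT A =====
-- the non-empty targets
def pvOutputs (examples : List (String × String)) : List String :=
  (examples.filter (fun p => p.2 ≠ "")).map (·.2)

-- nodes = sorted({char for output in outputs for char in output})
def pvNodes (examples : List (String × String)) : List Char :=
  PySem.List.sorted (PySem.Set.ofList ((pvOutputs examples).flatMap (fun o => o.toList)))
    (fun c => c) false

-- loop body for one (left_index, right_index) pair; the defaultdict read edges[left_char] is
-- ported as getD (the key created by the read is never observable in the returned Bool)
def pvEdgeStep (st : PySem.Dict Char (PySem.Set Char) × PySem.Dict Char Int) (lc rc : Char) :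
    PySem.Dict Char (PySem.Set Char) × PySem.Dict Char Int :=
  if lc = rc ∨ (st.1.getD lc PySem.Set.empty).contains rc then st
  else (st.1.insert lc (PySem.Set.add (st.1.getD lc PySem.Set.empty) rc),
        st.2.modify rc 0 (· + 1))

-- the double index loop over one output
def pvAddPairs (st : PySem.Dict Char (PySem.Set Char) × PySem.Dict Char Int) (cs : List Char) :
    PySem.Dict Char (PySem.Set Char) × PySem.Dict Char Int :=
  (PySem.List.pyRange 0 cs.length 1).foldl (fun st li =>
    (PySem.List.pyRange (li+1) cs.length 1).foldl (fun st ri =>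
      pvEdgeStep st (PySem.List.pyGetD cs li ' ') (PySem.List.pyGetD cs ri ' ')) st) st

-- indegree = {node: 0 for node in nodes}
def pvIndeg0 (examples : List (String × String)) : PySem.Dict Char Int :=
  (pvNodes examples).foldl (fun d n => d.insert n 0) PySem.Dict.empty

def pvBuildA (examples : List (String × String)) :
    PySem.Dict Char (PySem.Set Char) × PySem.Dict Char Int :=
  (pvOutputs examples).foldl (fun st o => pvAddPairs st o.toList)
    (PySem.Dict.empty, pvIndeg0 examples)

-- Kahn while-loop of A: queue.pop() from the end, decrement neighbours, append fresh
-- zero-indegree nodes; fuel = len(nodes) (the loop can never pop more than len(nodes) nodes,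
-- proved below, so the fuel never runs out before the queue is empty).
def pvKahnLoop (edges : PySem.Dict Char (PySem.Set Char)) :
    Nat → List Char → PySem.Dict Char Int → Nat → Nat
  | 0, _, _, visited => visited
  | fuel+1, queue, indeg, visited =>
    match PySem.List.pop? queue (-1) with
    | none => visited
    | some (node, rest) =>
      let st := (edges.getD node PySem.Set.empty).foldl
        (fun (st : PySem.Dict Char Int × List Char) nb =>
          let d' := st.1.modify nb 0 (· - 1)
          if d'.getD nb 0 = 0 then (d', st.2 ++ [nb]) else (d', st.2)) (indeg, rest)
      pvKahnLoop edges fuel st.2 st.1 (visited + 1)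

def glyph_output_order_acyclic (examples : List (String × String)) : Bool :=
  if (pvNodes examples).isEmpty then false
  else
    let st := pvBuildA examples
    let queue := (st.2.items.filter (fun p => p.2 == 0)).map (·.1)
    pvKahnLoop st.1 (pvNodes examples).length queue st.2 0 == (pvNodes examples).length

-- ===== PORT B =====
-- first/last occurrence index of every char of one target
def pvFL (cs : List Char) : PySem.Dict Char Int × PySem.Dict Char Int :=
  (PySem.List.enumerate cs 0).foldl
    (fun (fl : PySem.Dict Char Int × PySem.Dict Char Int) ic =>
      ((if fl.1.contains ic.2 then fl.1 else fl.1.insert ic.2 ic.1), fl.2.insert ic.2 ic.1))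
    (PySem.Dict.empty, PySem.Dict.empty)

-- inner loop: for b, lb in last.items(): if a != b and fa < lb: preds.setdefault(b, set()).add(a)
def pvInnerB (a : Char) (fa : Int) (L : List (Char × Int))
    (preds : PySem.Dict Char (PySem.Set Char)) : PySem.Dict Char (PySem.Set Char) :=
  L.foldl (fun preds blb =>
    if a ≠ blb.1 ∧ fa < blb.2 then
      preds.insert blb.1 (PySem.Set.add (preds.getD blb.1 PySem.Set.empty) a)
    else preds) preds

-- per-target update of preds
def pvAddOut (preds : PySem.Dict Char (PySem.Set Char)) (cs : List Char) :
    PySem.Dict Char (PySem.Set Char) :=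
  (pvFL cs).1.items.foldl
    (fun preds afa => (pvInnerB afa.1 afa.2 (pvFL cs).2.items preds).setdefault afa.1 PySem.Set.empty)
    preds

def pvBuildPreds (examples : List (String × String)) : PySem.Dict Char (PySem.Set Char) :=
  examples.foldl (fun preds p => if p.2 = "" then preds else pvAddOut preds p.2.toList)
    PySem.Dict.empty

-- keep = {v for v in remaining if preds[v] & remaining}
def pvKeep (preds : PySem.Dict Char (PySem.Set Char)) (remaining : List Char) : List Char :=
  remaining.filter (fun v => !(PySem.Set.inter (preds.getD v PySem.Set.empty) remaining).isEmpty)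

-- while True: … stop when nothing was dropped
def pvElimLoop (preds : PySem.Dict Char (PySem.Set Char)) (remaining : List Char) : Bool :=
  if _h : (pvKeep preds remaining).length = remaining.length then remaining.isEmpty
  else pvElimLoop preds (pvKeep preds remaining)
termination_by remaining.length
decreasing_by
  have hle := List.length_filter_le
    (fun v => !(PySem.Set.inter (preds.getD v PySem.Set.empty) remaining).isEmpty) remaining
  simp only [pvKeep] at _h ⊢
  omega

def glyph_output_order_acyclic_alt (examples : List (String × String)) : Bool :=
  let preds := pvBuildPreds examples
  if preds.items.isEmpty then false
  else pvElimLoop preds (PySem.Set.ofList preds.keys)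

-- ===== PRECONDITION & SPEC =====
def Spec_glyph_output_order_acyclic (examples : List (String × String)) (out : Bool) : Prop := out = glyph_output_order_acyclic_alt examples
instance (examples : List (String × String)) (out : Bool) : Decidable (Spec_glyph_output_order_acyclic examples out) := by unfold Spec_glyph_output_order_acyclic; infer_instance

-- ===== CLAIM (what is proved, stated in full; the proofs are below) =====
def Claim_equal_glyph_output_order_acyclic : Prop := ∀ (examples : List (String × String)), Dom_glyph_output_order_acyclic examples → Spec_glyph_output_order_acyclic examples (glyph_output_order_acyclic examples)

-- ===== LEMMAS AND PROOFS =====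

-- The common mathematical content: the precedence relation of the input, and "there is a
-- non-empty set of glyphs each of which has a predecessor inside the set" (= the glyph graph
-- has a cycle).  A's Kahn traversal and B's elimination loop both decide exactly this.

def pvChars (examples : List (String × String)) : List Char :=
  examples.flatMap (fun p => p.2.toList)

def pvR (examples : List (String × String)) (a b : Char) : Prop :=
  a ≠ b ∧ ∃ p ∈ examples, ∃ i j : Nat, i < j ∧ p.2.toList[i]? = some a ∧ p.2.toList[j]? = some b

def pvHasCore (examples : List (String × String)) : Prop :=
  ∃ S : List Char, S ≠ [] ∧ ∀ v ∈ S, ∃ u ∈ S, pvR examples u v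

lemma pvR_left_mem {ex : List (String × String)} {a b : Char} (h : pvR ex a b) :
    a ∈ pvChars ex := by
  obtain ⟨-, p, hp, i, j, hij, hi, hj⟩ := h
  exact List.mem_flatMap.mpr ⟨p, hp, List.mem_of_getElem? hi⟩

lemma pvR_right_mem {ex : List (String × String)} {a b : Char} (h : pvR ex a b) :
    b ∈ pvChars ex := by
  obtain ⟨-, p, hp, i, j, hij, hi, hj⟩ := h
  exact List.mem_flatMap.mpr ⟨p, hp, List.mem_of_getElem? hj⟩

-- ---------- generic list facts ----------

lemma pvLength_le_of_nodup_subset {l m : List Char} (hn : l.Nodup) (hs : ∀ x ∈ l, x ∈ m) :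
    l.length ≤ m.length := by
  have h1 : l.toFinset ⊆ m.toFinset := by
    intro x hx
    simpa using hs x (by simpa using hx)
  calc l.length = l.toFinset.card := (List.toFinset_card_of_nodup hn).symm
    _ ≤ m.toFinset.card := Finset.card_le_card h1
    _ ≤ m.length := m.toFinset_card_le

lemma pvSubset_of_nodup_subset_length {l m : List Char} (hln : l.Nodup)
    (hs : ∀ x ∈ l, x ∈ m) (hlen : m.length ≤ l.length) : ∀ x ∈ m, x ∈ l := by
  have h1 : l.toFinset ⊆ m.toFinset := by
    intro x hx
    simpa using hs x (by simpa using hx)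
  have hcard : m.toFinset.card ≤ l.toFinset.card := by
    calc m.toFinset.card ≤ m.length := m.toFinset_card_le
      _ ≤ l.length := hlen
      _ = l.toFinset.card := (List.toFinset_card_of_nodup hln).symm
  have heq := Finset.eq_of_subset_of_card_le h1 hcard
  intro x hx
  have : x ∈ l.toFinset := heq ▸ (List.mem_toFinset.mpr hx)
  simpa using this

-- removing one satisfying element from the filtered set
lemma pvFilter_length_succ {V : List Char} (hV : V.Nodup) {n : Char} (hn : n ∈ V)
    (p q : Char → Bool) (hq : ∀ u, q u = (p u && !(u == n))) (hp : p n = true) :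
    (V.filter p).length = (V.filter q).length + 1 := by
  induction V with
  | nil => simp at hn
  | cons c t ih =>
    rw [List.nodup_cons] at hV
    rcases List.mem_cons.mp hn with rfl | hnt
    · have hfilt : t.filter q = t.filter p :=
        List.filter_congr (fun u hu => by
          have hun : (u == n) = false := by
            simp only [beq_eq_false_iff_ne]
            exact fun h => hV.1 (h ▸ hu)
          rw [hq, hun]
          simp)
      have hqn : q n = false := by rw [hq]; simp
      simp [hp, hqn, hfilt]
    · have hrec := ih hV.2 hnt
      have hcn : (c == n) = false := by
        simp only [beq_eq_false_iff_ne]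
        intro h
        exact hV.1 (h ▸ hnt)
      by_cases hpc : p c = true
      · have hqc : q c = true := by rw [hq, hpc, hcn]; simp
        simp [hpc, hqc, hrec]
      · have hpc' : p c = false := by simpa using hpc
        have hqc : q c = false := by rw [hq, hpc']; simp
        simp [hpc', hqc, hrec]

-- ---------- occurrence pairs ----------

-- the pair condition of one target: some occurrence of a precedes some occurrence of b
def pvPairIn (cs : List Char) (a b : Char) : Prop :=
  ∃ i j : Nat, i < j ∧ cs[i]? = some a ∧ cs[j]? = some b

-- ---------- A side: nodes ----------

lemma pvNodes_mem (ex : List (String × String)) (c : Char) :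
    c ∈ pvNodes ex ↔ c ∈ pvChars ex := by
  unfold pvNodes pvOutputs pvChars
  rw [PySem.List.mem_sorted, PySem.Set.mem_ofList, List.mem_flatMap, List.mem_flatMap]
  constructor
  · rintro ⟨o, ho, hc⟩
    rcases List.mem_map.mp ho with ⟨p, hp, rfl⟩
    exact ⟨p, (List.mem_filter.mp hp).1, hc⟩
  · rintro ⟨p, hp, hc⟩
    refine ⟨p.2, List.mem_map.mpr ⟨p, List.mem_filter.mpr ⟨hp, ?_⟩, rfl⟩, hc⟩
    simp only [ne_eq, decide_not, Bool.not_eq_eq_eq_not, Bool.not_true, decide_eq_false_iff_not]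
    intro h
    rw [h] at hc
    simp at hc

lemma pvNodes_nodup (ex : List (String × String)) : (pvNodes ex).Nodup := by
  unfold pvNodes
  exact (PySem.List.sorted_perm _ _ _).symm.nodup (PySem.Set.nodup_ofList _)

lemma pvNodes_isEmpty_iff (ex : List (String × String)) :
    (pvNodes ex).isEmpty = true ↔ ∀ c : Char, c ∉ pvChars ex := by
  rw [List.isEmpty_iff, List.eq_nil_iff_forall_not_mem]
  constructor
  · intro h c hc
    exact h c ((pvNodes_mem ex c).mpr hc)
  · intro h c hc
    exact h c ((pvNodes_mem ex c).mp hc)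

-- ---------- A side: edge construction ----------

def pvInvA (V : List Char) (st : PySem.Dict Char (PySem.Set Char) × PySem.Dict Char Int)
    (Q : Char → Char → Prop) : Prop :=
  (∀ a b, b ∈ st.1.getD a PySem.Set.empty ↔ Q a b) ∧
  (∀ a, (st.1.getD a PySem.Set.empty).Nodup) ∧
  (∀ v, st.2.getD v 0 = ((V.filter (fun u => decide (v ∈ st.1.getD u PySem.Set.empty))).length : Int)) ∧
  (st.2.keys = V)

lemma pvInvA_congr {V st Q Q'} (h : pvInvA V st Q) (hQ : ∀ a b, Q a b ↔ Q' a b) :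
    pvInvA V st Q' :=
  ⟨fun a b => (h.1 a b).trans (hQ a b), h.2.1, h.2.2.1, h.2.2.2⟩

lemma pvEdgeStep_inv {V st Q} (hV : V.Nodup) {lc rc : Char} (hlc : lc ∈ V) (hrc : rc ∈ V)
    (h : pvInvA V st Q) :
    pvInvA V (pvEdgeStep st lc rc) (fun a b => Q a b ∨ (a = lc ∧ b = rc ∧ lc ≠ rc)) := by
  obtain ⟨h1, h2, h3, h4⟩ := h
  unfold pvEdgeStep
  by_cases hcond : lc = rc ∨ (st.1.getD lc PySem.Set.empty).contains rc = true
  · rw [if_pos hcond]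
    refine pvInvA_congr ⟨h1, h2, h3, h4⟩ ?_
    intro a b
    constructor
    · exact Or.inl
    · rintro (hq | ⟨rfl, rfl, hne⟩)
      · exact hq
      · rcases hcond with hlr | hcont
        · exact absurd hlr hne
        · exact (h1 a b).mp ((PySem.Set.contains_iff _ _).mp hcont)
  · rw [if_neg hcond]
    push Not at hcond
    obtain ⟨hne, hncont⟩ := hcond
    have hrcmem : rc ∉ st.1.getD lc PySem.Set.empty := by
      intro hmem
      exact hncont ((PySem.Set.contains_iff _ _).mpr hmem)
    refine ⟨?_, ?_, ?_, ?_⟩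
    · intro a b
      simp only
      rw [PySem.Dict.getD_insert]
      by_cases ha : a = lc
      · subst ha
        rw [if_pos rfl, PySem.Set.mem_add]
        constructor
        · rintro (hb | rfl)
          · exact Or.inl ((h1 a b).mp hb)
          · exact Or.inr ⟨rfl, rfl, hne⟩
        · rintro (hq | ⟨-, rfl, -⟩)
          · exact Or.inl ((h1 a b).mpr hq)
          · exact Or.inr rfl
      · rw [if_neg ha]
        rw [h1 a b]
        constructor
        · exact Or.inl
        · rintro (hq | ⟨hal, -, -⟩)
          · exact hq
          · exact absurd hal ha
    · intro a
      simp only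
      rw [PySem.Dict.getD_insert]
      by_cases ha : a = lc
      · rw [if_pos ha]
        exact PySem.Set.nodup_add _ _ (h2 lc)
      · rw [if_neg ha]
        exact h2 a
    · intro v
      simp only
      rw [PySem.Dict.getD_modify]
      by_cases hv : v = rc
      · subst hv
        rw [if_pos rfl, h3 v]
        have hcnt := pvFilter_length_succ hV hlc
          (fun u => decide (v ∈ (st.1.insert lc
            (PySem.Set.add (st.1.getD lc PySem.Set.empty) v)).getD u PySem.Set.empty))
          (fun u => decide (v ∈ st.1.getD u PySem.Set.empty))
          (fun u => by
            have hrcmem' : v ∉ st.1.getD lc ([] : PySem.Set Char) := hrcmem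
            by_cases hu : u = lc
            · subst hu
              simp [PySem.Set.empty, hrcmem']
            · have hbeq : (u == lc) = false := by
                simp only [beq_eq_false_iff_ne]
                exact hu
              simp [PySem.Dict.getD_insert, hu, hbeq, PySem.Set.empty])
          (by simp [PySem.Set.mem_add, PySem.Set.empty])
        rw [hcnt]
        push_cast
        ring
      · rw [if_neg hv, h3 v]
        have hfeq : List.filter (fun u => decide (v ∈ st.1.getD u PySem.Set.empty)) V =
            List.filter (fun u => decide (v ∈ (st.1.insert lc
              ((st.1.getD lc PySem.Set.empty).add rc)).getD u PySem.Set.empty)) V := by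
          apply List.filter_congr
          intro u hu
          by_cases hu' : u = lc
          · subst hu'
            simp [PySem.Set.mem_add, PySem.Set.empty, hv]
          · simp [PySem.Dict.getD_insert, hu', PySem.Set.empty]
        rw [hfeq]
    · simp only
      rw [PySem.Dict.keys_modify]
      rw [PySem.Dict.keys_insert_of_contains]
      · exact h4
      · rw [PySem.Dict.contains_iff_mem_keys, h4]
        exact hrc

lemma pvFoldPairs_inv {V : List Char} (hV : V.Nodup) :
    ∀ (ps : List (Char × Char)) st Q, pvInvA V st Q → (∀ q ∈ ps, q.1 ∈ V ∧ q.2 ∈ V) →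
    pvInvA V (ps.foldl (fun st q => pvEdgeStep st q.1 q.2) st)
      (fun a b => Q a b ∨ ((a, b) ∈ ps ∧ a ≠ b)) := by
  intro ps
  induction ps with
  | nil =>
    intro st Q h _
    simp only [List.foldl_nil]
    exact pvInvA_congr h (by simp)
  | cons q t ih =>
    intro st Q h hmem
    simp only [List.foldl_cons]
    have hq := hmem q (by simp)
    have hstep := pvEdgeStep_inv hV hq.1 hq.2 h
    have hrec := ih _ _ hstep (fun p hp => hmem p (List.mem_cons_of_mem _ hp))
    refine pvInvA_congr hrec ?_
    intro a b
    constructor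
    · rintro ((hQ | ⟨rfl, rfl, hne⟩) | ⟨hm, hne⟩)
      · exact Or.inl hQ
      · exact Or.inr ⟨by simp, hne⟩
      · exact Or.inr ⟨List.mem_cons_of_mem _ hm, hne⟩
    · rintro (hQ | ⟨hm, hne⟩)
      · exact Or.inl (Or.inl hQ)
      · rcases List.mem_cons.mp hm with heq | hmt
        · have h1 : a = q.1 := by rw [← heq]
          have h2 : b = q.2 := by rw [← heq]
          exact Or.inl (Or.inr ⟨h1, h2, h1 ▸ h2 ▸ hne⟩)
        · exact Or.inr ⟨hmt, hne⟩

def pvPairs (cs : List Char) : List (Char × Char) :=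
  (PySem.List.pyRange 0 cs.length 1).flatMap (fun li =>
    (PySem.List.pyRange (li+1) cs.length 1).map (fun ri =>
      (PySem.List.pyGetD cs li ' ', PySem.List.pyGetD cs ri ' ')))

lemma pvFoldl_flatMap {α β σ : Type} (l : List α) (f : α → List β) (g : σ → β → σ) :
    ∀ (init : σ), (l.flatMap f).foldl g init = l.foldl (fun s x => (f x).foldl g s) init := by
  induction l with
  | nil => intro init; simp
  | cons x t ih =>
    intro init
    simp [List.foldl_append, ih]

lemma pvAddPairs_eq (st) (cs : List Char) :
    pvAddPairs st cs = (pvPairs cs).foldl (fun st q => pvEdgeStep st q.1 q.2) st := by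
  unfold pvAddPairs pvPairs
  rw [pvFoldl_flatMap]
  simp only [List.foldl_map]

lemma pvMem_pairs (cs : List Char) (a b : Char) :
    (a, b) ∈ pvPairs cs ↔ pvPairIn cs a b := by
  unfold pvPairs pvPairIn
  rw [List.mem_flatMap]
  constructor
  · rintro ⟨li, hli, hmem⟩
    obtain ⟨ri, hri, heq⟩ := List.mem_map.mp hmem
    obtain ⟨hli0, hlin⟩ := PySem.List.mem_pyRange_one.mp hli
    obtain ⟨hri0, hrin⟩ := PySem.List.mem_pyRange_one.mp hri
    refine ⟨li.toNat, ri.toNat, by omega, ?_, ?_⟩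
    · have h1 : PySem.List.pyGetD cs li ' ' = a := congrArg Prod.fst heq
      rw [PySem.List.pyGetD_of_nonneg cs ' ' hli0] at h1
      have hlt : li.toNat < cs.length := by omega
      rw [List.getD_eq_getElem?_getD, List.getElem?_eq_getElem hlt] at h1
      rw [List.getElem?_eq_getElem hlt]
      simpa using congrArg some h1
    · have h2 : PySem.List.pyGetD cs ri ' ' = b := congrArg Prod.snd heq
      rw [PySem.List.pyGetD_of_nonneg cs ' ' (by omega : (0:Int) ≤ ri)] at h2
      have hlt : ri.toNat < cs.length := by omega
      rw [List.getD_eq_getElem?_getD, List.getElem?_eq_getElem hlt] at h2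
      rw [List.getElem?_eq_getElem hlt]
      simpa using congrArg some h2
  · rintro ⟨i, j, hij, hi, hj⟩
    obtain ⟨hilen, hia⟩ := List.getElem?_eq_some_iff.mp hi
    obtain ⟨hjlen, hjb⟩ := List.getElem?_eq_some_iff.mp hj
    refine ⟨(i : Int), PySem.List.mem_pyRange_one.mpr ⟨by omega, by exact_mod_cast hilen⟩, ?_⟩
    refine List.mem_map.mpr ⟨(j : Int), PySem.List.mem_pyRange_one.mpr
      ⟨by exact_mod_cast (by omega : (i:Int) + 1 ≤ (j:Int)), by exact_mod_cast hjlen⟩, ?_⟩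
    rw [PySem.List.pyGetD_of_nonneg cs ' ' (by omega : (0:Int) ≤ (i:Int)),
      PySem.List.pyGetD_of_nonneg cs ' ' (by omega : (0:Int) ≤ (j:Int))]
    simp only [Int.toNat_natCast]
    rw [List.getD_eq_getElem?_getD, List.getElem?_eq_getElem hilen,
      List.getD_eq_getElem?_getD, List.getElem?_eq_getElem hjlen]
    simp [hia, hjb]

def pvAllPairs (ex : List (String × String)) : List (Char × Char) :=
  (pvOutputs ex).flatMap (fun o => pvPairs o.toList)

lemma pvBuildA_eq (ex : List (String × String)) :
    pvBuildA ex = (pvAllPairs ex).foldl (fun st q => pvEdgeStep st q.1 q.2)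
      (PySem.Dict.empty, pvIndeg0 ex) := by
  unfold pvBuildA pvAllPairs
  rw [pvFoldl_flatMap]
  have hfun : (fun (st : PySem.Dict Char (PySem.Set Char) × PySem.Dict Char Int) (o : String) =>
      pvAddPairs st o.toList) = (fun st o => (pvPairs o.toList).foldl
        (fun st q => pvEdgeStep st q.1 q.2) st) := by
    funext st o
    exact pvAddPairs_eq st o.toList
  rw [hfun]

lemma pvMem_allPairs (ex : List (String × String)) (a b : Char) :
    ((a, b) ∈ pvAllPairs ex ∧ a ≠ b) ↔ pvR ex a b := by
  unfold pvAllPairs pvR pvOutputs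
  rw [List.mem_flatMap]
  constructor
  · rintro ⟨⟨o, ho, hmem⟩, hab⟩
    rcases List.mem_map.mp ho with ⟨p, hp, rfl⟩
    obtain ⟨i, j, hij, hi, hj⟩ := (pvMem_pairs _ a b).mp hmem
    exact ⟨hab, p, (List.mem_filter.mp hp).1, i, j, hij, hi, hj⟩
  · rintro ⟨hab, p, hp, i, j, hij, hi, hj⟩
    refine ⟨⟨p.2, List.mem_map.mpr ⟨p, List.mem_filter.mpr ⟨hp, ?_⟩, rfl⟩,
      (pvMem_pairs _ a b).mpr ⟨i, j, hij, hi, hj⟩⟩, hab⟩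
    simp only [ne_eq, decide_not, Bool.not_eq_eq_eq_not, Bool.not_true, decide_eq_false_iff_not]
    intro h
    rw [h] at hi
    simp at hi

lemma pvIndeg0_getD_aux :
    ∀ (l : List Char) (d : PySem.Dict Char Int), (∀ v, d.getD v 0 = 0) →
      ∀ v, (l.foldl (fun d n => d.insert n 0) d).getD v 0 = 0 := by
  intro l
  induction l with
  | nil => intro d hd v; exact hd v
  | cons n t ih =>
    intro d hd v
    simp only [List.foldl_cons]
    apply ih
    intro w
    rw [PySem.Dict.getD_insert]
    split <;> simp [hd]

lemma pvIndeg0_getD (ex : List (String × String)) (v : Char) :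
    (pvIndeg0 ex).getD v 0 = 0 := by
  unfold pvIndeg0
  exact pvIndeg0_getD_aux _ _ (fun v => PySem.Dict.getD_empty _ _) v

lemma pvIndeg0_keys (ex : List (String × String)) : (pvIndeg0 ex).keys = pvNodes ex := by
  unfold pvIndeg0
  rw [PySem.Dict.keys_foldl_insert]
  rw [PySem.Dict.keys_empty, PySem.Set.update_nil_left]
  exact PySem.Set.ofList_eq_self_of_nodup _ (pvNodes_nodup ex)

lemma pvOutputs_subset_chars (ex : List (String × String)) (o : String)
    (ho : o ∈ pvOutputs ex) (c : Char) (hc : c ∈ o.toList) : c ∈ pvChars ex := by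
  unfold pvOutputs at ho
  rcases List.mem_map.mp ho with ⟨p, hp, rfl⟩
  exact List.mem_flatMap.mpr ⟨p, (List.mem_filter.mp hp).1, hc⟩

lemma pvBuildA_inv (ex : List (String × String)) :
    pvInvA (pvNodes ex) (pvBuildA ex) (pvR ex) := by
  rw [pvBuildA_eq]
  have hinit : pvInvA (pvNodes ex) ((PySem.Dict.empty, pvIndeg0 ex) :
      PySem.Dict Char (PySem.Set Char) × PySem.Dict Char Int) (fun _ _ => False) := by
    refine ⟨?_, ?_, ?_, pvIndeg0_keys ex⟩
    · intro a b
      rw [PySem.Dict.getD_empty]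
      simp [PySem.Set.empty]
    · intro a
      rw [PySem.Dict.getD_empty]
      simp [PySem.Set.empty]
    · intro v
      rw [pvIndeg0_getD]
      have : ∀ u ∈ pvNodes ex,
          (decide (v ∈ (PySem.Dict.empty : PySem.Dict Char (PySem.Set Char)).getD u
            PySem.Set.empty)) = false := by
        intro u _
        rw [PySem.Dict.getD_empty]
        simp [PySem.Set.empty]
      rw [List.filter_congr this]
      simp
  have hbound : ∀ q ∈ pvAllPairs ex, q.1 ∈ pvNodes ex ∧ q.2 ∈ pvNodes ex := by
    intro q hq
    obtain ⟨o, ho, hmem⟩ := List.mem_flatMap.mp hq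
    have hpair : pvPairIn o.toList q.1 q.2 := (pvMem_pairs _ _ _).mp (by simpa using hmem)
    obtain ⟨i, j, hij, hi, hj⟩ := hpair
    constructor
    · exact (pvNodes_mem ex q.1).mpr (pvOutputs_subset_chars ex o ho _ (List.mem_of_getElem? hi))
    · exact (pvNodes_mem ex q.2).mpr (pvOutputs_subset_chars ex o ho _ (List.mem_of_getElem? hj))
  have h := pvFoldPairs_inv (pvNodes_nodup ex) (pvAllPairs ex) _ _ hinit hbound
  refine pvInvA_congr h ?_
  intro a b
  rw [false_or]
  exact pvMem_allPairs ex a b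

-- ---------- A side: the Kahn loop ----------

def pvEdge (edges : PySem.Dict Char (PySem.Set Char)) (a b : Char) : Prop :=
  b ∈ edges.getD a PySem.Set.empty

def pvBad (edges : PySem.Dict Char (PySem.Set Char)) (V : List Char) : Prop :=
  ∃ S : List Char, S ≠ [] ∧ (∀ x ∈ S, x ∈ V) ∧ ∀ v ∈ S, ∃ u ∈ S, pvEdge edges u v

def pvKahnInv (edges : PySem.Dict Char (PySem.Set Char)) (V popped queue : List Char)
    (indeg : PySem.Dict Char Int) : Prop :=
  popped.Nodup ∧ queue.Nodup ∧
  (∀ x ∈ popped, x ∈ V) ∧ (∀ x ∈ queue, x ∈ V) ∧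
  (∀ x ∈ queue, x ∉ popped) ∧
  (∀ v, indeg.getD v 0 =
    ((V.filter (fun u => decide (v ∈ edges.getD u PySem.Set.empty) && !(decide (u ∈ popped)))).length : Int)) ∧
  (∀ v ∈ V, v ∉ popped → (v ∈ queue ↔ ∀ u, pvEdge edges u v → u ∈ popped)) ∧
  (∀ x ∈ popped, ∀ u, pvEdge edges u x → u ∈ popped) ∧
  (∀ S : List Char, (∀ x ∈ S, x ∈ V) → (∀ v ∈ S, ∃ u ∈ S, pvEdge edges u v) →
    ∀ x ∈ S, x ∉ popped ∧ x ∉ queue)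

-- a nodup list whose members all equal n has length 1
lemma pvAllEq_length {l : List Char} {n : Char} (hnd : l.Nodup) (hn : n ∈ l)
    (hall : ∀ x ∈ l, x = n) : l.length = 1 := by
  cases l with
  | nil => simp at hn
  | cons a t =>
    have ha : a = n := hall a (by simp)
    have ht : t = [] := by
      rw [List.eq_nil_iff_forall_not_mem]
      intro x hx
      have hxn : x = n := hall x (List.mem_cons_of_mem _ hx)
      rw [List.nodup_cons] at hnd
      exact hnd.1 (ha ▸ hxn ▸ hx)
    rw [ht]
    rfl

lemma pvLength_one_eq {l : List Char} {u n : Char} (hlen : l.length = 1)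
    (hu : u ∈ l) (hn : n ∈ l) : u = n := by
  obtain ⟨a, rfl⟩ := List.length_eq_one_iff.mp hlen
  have h1 : u = a := by simpa using hu
  have h2 : n = a := by simpa using hn
  rw [h1, h2]

-- one pop step: the neighbour fold
lemma pvDecFold (indeg : PySem.Dict Char Int) (qs : List Char) (ns : List Char)
    (hns : ns.Nodup) :
    (∀ v, (ns.foldl (fun (st : PySem.Dict Char Int × List Char) nb =>
        let d' := st.1.modify nb 0 (· - 1)
        if d'.getD nb 0 = 0 then (d', st.2 ++ [nb]) else (d', st.2)) (indeg, qs)).1.getD v 0 =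
      if v ∈ ns then indeg.getD v 0 - 1 else indeg.getD v 0) ∧
    (ns.foldl (fun (st : PySem.Dict Char Int × List Char) nb =>
        let d' := st.1.modify nb 0 (· - 1)
        if d'.getD nb 0 = 0 then (d', st.2 ++ [nb]) else (d', st.2)) (indeg, qs)).2 =
      qs ++ ns.filter (fun v => indeg.getD v 0 == 1) := by
  induction ns generalizing indeg qs with
  | nil => simp
  | cons m rest ih =>
    rw [List.nodup_cons] at hns
    have happ : (let d' := (indeg, qs).1.modify m 0 (· - 1);
        if d'.getD m 0 = 0 then (d', (indeg, qs).2 ++ [m]) else (d', (indeg, qs).2)) =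
        (indeg.modify m 0 (· - 1),
          if (indeg.modify m 0 (· - 1)).getD m 0 = 0 then qs ++ [m] else qs) := by
      dsimp only
      split <;> rfl
    rw [List.foldl_cons, happ]
    obtain ⟨ihA, ihB⟩ := ih (indeg.modify m 0 (· - 1))
      (if (indeg.modify m 0 (· - 1)).getD m 0 = 0 then qs ++ [m] else qs) hns.2
    have hgm : (indeg.modify m 0 (· - 1)).getD m 0 = indeg.getD m 0 - 1 :=
      PySem.Dict.getD_modify_self _ _ _ _
    have hgne : ∀ v, v ≠ m → (indeg.modify m 0 (· - 1)).getD v 0 = indeg.getD v 0 := by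
      intro v hv
      rw [PySem.Dict.getD_modify]
      exact if_neg hv
    constructor
    · intro v
      rw [ihA v]
      by_cases hvrest : v ∈ rest
      · have hvm : v ≠ m := fun h => hns.1 (h ▸ hvrest)
        rw [if_pos hvrest, if_pos (List.mem_cons_of_mem _ hvrest), hgne v hvm]
      · by_cases hvm : v = m
        · subst hvm
          rw [if_neg hvrest, if_pos (by simp), hgm]
        · rw [if_neg hvrest, if_neg (by
            intro hmem
            rcases List.mem_cons.mp hmem with h | h
            · exact hvm h
            · exact hvrest h), hgne v hvm]
    · rw [ihB]
      have hfilt : rest.filter (fun v => (indeg.modify m 0 (· - 1)).getD v 0 == 1) =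
          rest.filter (fun v => indeg.getD v 0 == 1) := by
        apply List.filter_congr
        intro v hv
        rw [hgne v (fun h => hns.1 (h ▸ hv))]
      rw [hfilt, List.filter_cons]
      by_cases hm1 : indeg.getD m 0 = 1
      · have hc1 : ((indeg.modify m 0 (· - 1)).getD m 0 = 0) := by rw [hgm, hm1]; ring
        have hc2 : (indeg.getD m 0 == 1) = true := by simp [hm1]
        rw [if_pos hc1, hc2]
        simp
      · have hc1 : ¬((indeg.modify m 0 (· - 1)).getD m 0 = 0) := by
          rw [hgm]
          omega
        have hc2 : (indeg.getD m 0 == 1) = false := by simp [hm1]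
        rw [if_neg hc1, hc2]
        simp

lemma pvKahn_main {edges : PySem.Dict Char (PySem.Set Char)} {V : List Char} (hV : V.Nodup)
    (hEV : ∀ a b, pvEdge edges a b → a ≠ b ∧ a ∈ V ∧ b ∈ V)
    (hEN : ∀ a, (edges.getD a PySem.Set.empty).Nodup) :
    ∀ (fuel : Nat) (popped queue : List Char) (indeg : PySem.Dict Char Int),
      pvKahnInv edges V popped queue indeg → V.length ≤ fuel + popped.length →
      (pvKahnLoop edges fuel queue indeg popped.length = V.length ↔ ¬ pvBad edges V) := by
  intro fuel
  induction fuel with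
  | zero =>
    intro popped queue indeg hinv hfuel
    obtain ⟨c1, c2, c3, c4, c5, c6, c7, c8, c9⟩ := hinv
    have hle : popped.length ≤ V.length := pvLength_le_of_nodup_subset c1 c3
    have hlen : popped.length = V.length := by omega
    have hcover := pvSubset_of_nodup_subset_length c1 c3 (by omega)
    show popped.length = V.length ↔ _
    refine iff_of_true hlen ?_
    rintro ⟨S, hne, hSV, hcl⟩
    obtain ⟨x, hx⟩ := List.exists_mem_of_ne_nil S hne
    exact (c9 S hSV hcl x hx).1 (hcover x (hSV x hx))
  | succ fuel ih =>
    intro popped queue indeg hinv hfuel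
    obtain ⟨c1, c2, c3, c4, c5, c6, c7, c8, c9⟩ := hinv
    rcases List.eq_nil_or_concat queue with rfl | ⟨qs, n, rfl⟩
    · show popped.length = V.length ↔ _
      by_cases hcov : popped.length = V.length
      · refine iff_of_true hcov ?_
        have hcover := pvSubset_of_nodup_subset_length c1 c3 (le_of_eq hcov.symm)
        rintro ⟨S, hne, hSV, hcl⟩
        obtain ⟨x, hx⟩ := List.exists_mem_of_ne_nil S hne
        exact (c9 S hSV hcl x hx).1 (hcover x (hSV x hx))
      · refine iff_of_false hcov ?_
        rw [not_not]
        refine ⟨V.filter (fun x => !(decide (x ∈ popped))), ?_, ?_, ?_⟩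
        · intro hnil
          apply hcov
          have hsub : ∀ x ∈ V, x ∈ popped := by
            intro x hxV
            by_contra hxp
            have hxf : x ∈ V.filter (fun x => !(decide (x ∈ popped))) :=
              List.mem_filter.mpr ⟨hxV, by simp [hxp]⟩
            rw [hnil] at hxf
            exact absurd hxf List.not_mem_nil
          have h1 := pvLength_le_of_nodup_subset hV hsub
          have h2 := pvLength_le_of_nodup_subset c1 c3
          omega
        · intro x hx
          exact (List.mem_filter.mp hx).1
        · intro v hv
          obtain ⟨hvV, hvp'⟩ := List.mem_filter.mp hv
          have hvp : v ∉ popped := by simpa using hvp'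
          have hnall : ¬ ∀ u, pvEdge edges u v → u ∈ popped := by
            intro hall
            exact absurd ((c7 v hvV hvp).mpr hall) List.not_mem_nil
          push Not at hnall
          obtain ⟨u, hedge, hup⟩ := hnall
          exact ⟨u, List.mem_filter.mpr ⟨(hEV u v hedge).2.1, by simp [hup]⟩, hedge⟩
    · rw [List.concat_eq_append] at *
      obtain ⟨hnsdec1, hnsdec2⟩ := pvDecFold indeg qs (edges.getD n PySem.Set.empty) (hEN n)
      have hnq : n ∈ qs ++ [n] := by simp
      have hnV : n ∈ V := c4 n hnq
      have hnp : n ∉ popped := c5 n hnq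
      have hall : ∀ u, pvEdge edges u n → u ∈ popped := (c7 n hnV hnp).mp hnq
      rw [List.nodup_append] at c2
      have hqsnd : qs.Nodup := c2.1
      have hnqs : n ∉ qs := fun h => c2.2.2 n h n (by simp) rfl
      have hnsV : ∀ b, b ∈ edges.getD n PySem.Set.empty → b ∈ V ∧ n ≠ b :=
        fun b hb => ⟨(hEV n b hb).2.2, (hEV n b hb).1⟩
      have hn_ns : n ∉ edges.getD n PySem.Set.empty := fun h => (hEV n n h).1 rfl
      have hpop_ns : ∀ v ∈ edges.getD n PySem.Set.empty, v ∉ popped := by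
        intro v hv hvp
        exact hnp (c8 v hvp n hv)
      have hqs_ns : ∀ v ∈ edges.getD n PySem.Set.empty, v ∉ qs := by
        intro v hv hvq
        have hvqueue : v ∈ qs ++ [n] := List.mem_append_left _ hvq
        exact hnp ((c7 v (c4 v hvqueue) (c5 v hvqueue)).mp hvqueue n hv)
      -- the popped'-filter identity used for counts
      have hq_pred : ∀ v, ∀ u : Char,
          (decide (v ∈ edges.getD u PySem.Set.empty) && !(decide (u ∈ popped ++ [n]))) =
          ((decide (v ∈ edges.getD u PySem.Set.empty) && !(decide (u ∈ popped))) &&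
            !(u == n)) := by
        intro v u
        by_cases h1 : u ∈ popped <;> by_cases h2 : u = n <;>
          simp [h1, h2, List.mem_append]
      -- c6 for the new state
      have hC6 : ∀ v, ((edges.getD n PySem.Set.empty).foldl
          (fun (st : PySem.Dict Char Int × List Char) nb =>
            let d' := st.1.modify nb 0 (· - 1)
            if d'.getD nb 0 = 0 then (d', st.2 ++ [nb]) else (d', st.2)) (indeg, qs)).1.getD v 0 =
          ((V.filter (fun u => decide (v ∈ edges.getD u PySem.Set.empty) &&
            !(decide (u ∈ popped ++ [n])))).length : Int) := by
        intro v
        rw [hnsdec1 v]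
        by_cases hvns : v ∈ edges.getD n PySem.Set.empty
        · rw [if_pos hvns, c6 v]
          have hcnt := pvFilter_length_succ hV hnV
            (fun u => decide (v ∈ edges.getD u PySem.Set.empty) && !(decide (u ∈ popped)))
            (fun u => decide (v ∈ edges.getD u PySem.Set.empty) && !(decide (u ∈ popped ++ [n])))
            (fun u => hq_pred v u)
            (by simp [hnp]; exact hvns)
          rw [hcnt]
          push_cast
          ring
        · rw [if_neg hvns, c6 v]
          congr 2
          apply List.filter_congr
          intro u hu
          by_cases h2 : u = n
          · subst h2
            have hd : decide (v ∈ edges.getD u PySem.Set.empty) = false :=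
              decide_eq_false hvns
            simp
            exact fun hmem => absurd hmem hvns
          · simp [List.mem_append, h2]
      have hinv' : pvKahnInv edges V (popped ++ [n])
          (qs ++ (edges.getD n PySem.Set.empty).filter (fun v => indeg.getD v 0 == 1))
          ((edges.getD n PySem.Set.empty).foldl
            (fun (st : PySem.Dict Char Int × List Char) nb =>
              let d' := st.1.modify nb 0 (· - 1)
              if d'.getD nb 0 = 0 then (d', st.2 ++ [nb]) else (d', st.2)) (indeg, qs)).1 := by
        refine ⟨?_, ?_, ?_, ?_, ?_, hC6, ?_, ?_, ?_⟩
        · rw [List.nodup_append]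
          exact ⟨c1, by simp, fun a ha b hb => by
            simp only [List.mem_singleton] at hb
            subst hb
            exact fun h => hnp (h ▸ ha)⟩
        · rw [List.nodup_append]
          refine ⟨hqsnd, List.Nodup.filter _ (hEN n), ?_⟩
          intro a ha b hb
          have hbns := (List.mem_filter.mp hb).1
          intro h
          exact hqs_ns b hbns (h ▸ ha)
        · intro x hx
          rcases List.mem_append.mp hx with hx | hx
          · exact c3 x hx
          · simp only [List.mem_singleton] at hx
            exact hx ▸ hnV
        · intro x hx
          rcases List.mem_append.mp hx with hx | hx
          · exact c4 x (List.mem_append_left _ hx)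
          · exact (hnsV x (List.mem_filter.mp hx).1).1
        · intro x hx
          rcases List.mem_append.mp hx with hx1 | hx1
          · have h1 := c5 x (List.mem_append_left _ hx1)
            simp only [List.mem_append, List.mem_singleton]
            rintro (h | rfl)
            · exact h1 h
            · exact hnqs hx1
          · have hxns := (List.mem_filter.mp hx1).1
            simp only [List.mem_append, List.mem_singleton]
            rintro (h | rfl)
            · exact hpop_ns x hxns h
            · exact hn_ns hxns
        · -- c7
          intro v hvV hvp'
          have hvp : v ∉ popped := fun h => hvp' (List.mem_append_left _ h)
          have hvn : v ≠ n := fun h => hvp' (List.mem_append_right _ (by simp [h]))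
          constructor
          · intro hvq'
            rcases List.mem_append.mp hvq' with hvq | hvq
            · intro u hedge
              exact List.mem_append_left _ ((c7 v hvV hvp).mp (List.mem_append_left _ hvq) u hedge)
            · obtain ⟨hvns, hbeq⟩ := List.mem_filter.mp hvq
              have hcnt1 : (V.filter (fun u => decide (v ∈ edges.getD u PySem.Set.empty) &&
                  !(decide (u ∈ popped)))).length = 1 := by
                have := c6 v
                have hb : indeg.getD v 0 = 1 := by
                  simpa using hbeq
                rw [hb] at this
                exact_mod_cast this.symm
              intro u hedge
              by_contra hup'
              have hupop : u ∉ popped := fun h => hup' (List.mem_append_left _ h)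
              have hun : u ≠ n := fun h => hup' (List.mem_append_right _ (by simp [h]))
              have humem : u ∈ V.filter (fun u => decide (v ∈ edges.getD u PySem.Set.empty) &&
                  !(decide (u ∈ popped))) :=
                List.mem_filter.mpr ⟨(hEV u v hedge).2.1, by simp [hupop]; exact hedge⟩
              have hnmem : n ∈ V.filter (fun u => decide (v ∈ edges.getD u PySem.Set.empty) &&
                  !(decide (u ∈ popped))) :=
                List.mem_filter.mpr ⟨hnV, by simp [hnp]; exact hvns⟩
              exact hun (pvLength_one_eq hcnt1 humem hnmem)
          · intro hall'
            by_cases hvns : v ∈ edges.getD n PySem.Set.empty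
            · refine List.mem_append_right _ (List.mem_filter.mpr ⟨hvns, ?_⟩)
              have hnmem : n ∈ V.filter (fun u => decide (v ∈ edges.getD u PySem.Set.empty) &&
                  !(decide (u ∈ popped))) :=
                List.mem_filter.mpr ⟨hnV, by simp [hnp]; exact hvns⟩
              have halleq : ∀ x ∈ V.filter (fun u => decide (v ∈ edges.getD u PySem.Set.empty) &&
                  !(decide (u ∈ popped))), x = n := by
                intro x hxf
                obtain ⟨hxV, hxb⟩ := List.mem_filter.mp hxf
                simp only [Bool.and_eq_true, decide_eq_true_eq, Bool.not_eq_eq_eq_not,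
                  Bool.not_true, decide_eq_false_iff_not] at hxb
                have hmem' := hall' x hxb.1
                rcases List.mem_append.mp hmem' with h | h
                · exact absurd h hxb.2
                · simpa using h
              have hlen1 := pvAllEq_length (List.Nodup.filter _ hV) hnmem halleq
              have := c6 v
              rw [hlen1] at this
              simp [this]
            · have hga : ∀ u, pvEdge edges u v → u ∈ popped := by
                intro u hedge
                have hmem' := hall' u hedge
                rcases List.mem_append.mp hmem' with h | h
                · exact h
                · have : u = n := by simpa using h
                  subst this
                  exact absurd hedge hvns
              have hvq := (c7 v hvV hvp).mpr hga
              rcases List.mem_append.mp hvq with h | h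
              · exact List.mem_append_left _ h
              · have : v = n := by simpa using h
                exact absurd this hvn
        · -- c8
          intro x hx u hedge
          rcases List.mem_append.mp hx with hx | hx
          · exact List.mem_append_left _ (c8 x hx u hedge)
          · have : x = n := by simpa using hx
            subst this
            exact List.mem_append_left _ (hall u hedge)
        · -- c9
          intro S hSV hcl x hx
          obtain ⟨hxp, hxq⟩ := c9 S hSV hcl x hx
          have hxqs : x ∉ qs := fun h => hxq (List.mem_append_left _ h)
          have hxn : x ≠ n := fun h => hxq (List.mem_append_right _ (by simp [h]))
          constructor
          · simp only [List.mem_append, List.mem_singleton]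
            rintro (h | rfl)
            · exact hxp h
            · exact hxn rfl
          · simp only [List.mem_append]
            rintro (h | h)
            · exact hxqs h
            · obtain ⟨hxns, hbeq⟩ := List.mem_filter.mp h
              have hcnt1 : (V.filter (fun u => decide (x ∈ edges.getD u PySem.Set.empty) &&
                  !(decide (u ∈ popped)))).length = 1 := by
                have := c6 x
                have hb : indeg.getD x 0 = 1 := by simpa using hbeq
                rw [hb] at this
                exact_mod_cast this.symm
              obtain ⟨u, huS, hedge⟩ := hcl x hx
              obtain ⟨hup, huq⟩ := c9 S hSV hcl u huS
              have hun : u ≠ n := fun h => huq (h ▸ List.mem_append_right _ (by simp))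
              have humem : u ∈ V.filter (fun u => decide (x ∈ edges.getD u PySem.Set.empty) &&
                  !(decide (u ∈ popped))) :=
                List.mem_filter.mpr ⟨(hEV u x hedge).2.1, by simp [hup]; exact hedge⟩
              have hnmem : n ∈ V.filter (fun u => decide (x ∈ edges.getD u PySem.Set.empty) &&
                  !(decide (u ∈ popped))) :=
                List.mem_filter.mpr ⟨hnV, by simp [hnp]; exact hxns⟩
              exact hun (pvLength_one_eq hcnt1 humem hnmem)
      have hinv'' : pvKahnInv edges V (popped ++ [n])
          ((edges.getD n PySem.Set.empty).foldl
            (fun (st : PySem.Dict Char Int × List Char) nb =>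
              let d' := st.1.modify nb 0 (· - 1)
              if d'.getD nb 0 = 0 then (d', st.2 ++ [nb]) else (d', st.2)) (indeg, qs)).2
          ((edges.getD n PySem.Set.empty).foldl
            (fun (st : PySem.Dict Char Int × List Char) nb =>
              let d' := st.1.modify nb 0 (· - 1)
              if d'.getD nb 0 = 0 then (d', st.2 ++ [nb]) else (d', st.2)) (indeg, qs)).1 := by
        rw [hnsdec2]
        exact hinv'
      have hres := ih (popped ++ [n]) _ _ hinv'' (by simp; omega)
      simp only [List.length_append, List.length_cons, List.length_nil] at hres
      show pvKahnLoop edges (fuel+1) (qs ++ [n]) indeg popped.length = V.length ↔ _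
      rw [pvKahnLoop, PySem.List.pop?_last]
      exact hres

lemma pvA_iff (ex : List (String × String)) :
    glyph_output_order_acyclic ex = true ↔
      ((∃ c : Char, c ∈ pvChars ex) ∧ ¬ pvHasCore ex) := by
  have hdef : glyph_output_order_acyclic ex =
      if (pvNodes ex).isEmpty then false
      else pvKahnLoop (pvBuildA ex).1 (pvNodes ex).length
        (((pvBuildA ex).2.items.filter (fun p => p.2 == 0)).map (·.1)) (pvBuildA ex).2 0 ==
        (pvNodes ex).length := rfl
  rw [hdef]
  by_cases hemp : (pvNodes ex).isEmpty = true
  · rw [if_pos hemp]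
    simp only [Bool.false_eq_true, false_iff]
    rintro ⟨⟨c, hc⟩, -⟩
    exact (pvNodes_isEmpty_iff ex).mp hemp c hc
  · rw [if_neg hemp]
    obtain ⟨h1, h2, h3, h4⟩ := pvBuildA_inv ex
    have hVnd : (pvNodes ex).Nodup := pvNodes_nodup ex
    have hEV : ∀ a b, pvEdge (pvBuildA ex).1 a b → a ≠ b ∧ a ∈ pvNodes ex ∧ b ∈ pvNodes ex := by
      intro a b hedge
      have hR := (h1 a b).mp hedge
      exact ⟨hR.1, (pvNodes_mem ex a).mpr (pvR_left_mem hR),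
        (pvNodes_mem ex b).mpr (pvR_right_mem hR)⟩
    have hkeysnd : (pvBuildA ex).2.keys.Nodup := by rw [h4]; exact hVnd
    have hitems : (pvBuildA ex).2.items =
        (pvNodes ex).map (fun k => (k, (pvBuildA ex).2.getD k 0)) := by
      rw [← h4]
      exact PySem.Dict.items_eq_map_keys _ hkeysnd 0
    have hqueue : (((pvBuildA ex).2.items.filter (fun p => p.2 == 0)).map (·.1)) =
        (pvNodes ex).filter (fun k => (pvBuildA ex).2.getD k 0 == 0) := by
      rw [hitems, List.filter_map, List.map_map]
      simp [Function.comp_def]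
    have hinv : pvKahnInv (pvBuildA ex).1 (pvNodes ex) []
        ((pvNodes ex).filter (fun k => (pvBuildA ex).2.getD k 0 == 0)) (pvBuildA ex).2 := by
      refine ⟨List.nodup_nil, List.Nodup.filter _ hVnd, by simp,
        fun x hx => (List.mem_filter.mp hx).1, by simp, ?_, ?_, by simp, ?_⟩
      · intro v
        rw [h3 v]
        congr 2
        apply List.filter_congr
        intro u hu
        simp
      · intro v hvV _
        constructor
        · intro hvq u hedge
          obtain ⟨-, hbeq⟩ := List.mem_filter.mp hvq
          have hcnt0 : ((pvNodes ex).filter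
              (fun u => decide (v ∈ (pvBuildA ex).1.getD u PySem.Set.empty))).length = 0 := by
            have h3v := h3 v
            have hb : (pvBuildA ex).2.getD v 0 = 0 := by simpa using hbeq
            rw [hb] at h3v
            exact_mod_cast h3v.symm
          have humem : u ∈ (pvNodes ex).filter
              (fun u => decide (v ∈ (pvBuildA ex).1.getD u PySem.Set.empty)) :=
            List.mem_filter.mpr ⟨(hEV u v hedge).2.1,
              decide_eq_true (show v ∈ (pvBuildA ex).1.getD u PySem.Set.empty from hedge)⟩
          rw [List.length_eq_zero_iff] at hcnt0
          rw [hcnt0] at humem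
          exact absurd humem List.not_mem_nil
        · intro hall
          refine List.mem_filter.mpr ⟨hvV, ?_⟩
          have hcnt0 : (pvNodes ex).filter
              (fun u => decide (v ∈ (pvBuildA ex).1.getD u PySem.Set.empty)) = [] := by
            rw [List.filter_eq_nil_iff]
            intro u huV hdec
            have hmemd : v ∈ (pvBuildA ex).1.getD u PySem.Set.empty := of_decide_eq_true hdec
            exact absurd (hall u hmemd) List.not_mem_nil
          have h3v := h3 v
          rw [hcnt0] at h3v
          simp [h3v]
      · intro S hSV hcl x hx
        refine ⟨List.not_mem_nil, ?_⟩
        intro hxq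
        obtain ⟨-, hbeq⟩ := List.mem_filter.mp hxq
        obtain ⟨u, huS, hedge⟩ := hcl x hx
        have hcnt0 : ((pvNodes ex).filter
            (fun u => decide (x ∈ (pvBuildA ex).1.getD u PySem.Set.empty))).length = 0 := by
          have h3x := h3 x
          have hb : (pvBuildA ex).2.getD x 0 = 0 := by simpa using hbeq
          rw [hb] at h3x
          exact_mod_cast h3x.symm
        have humem : u ∈ (pvNodes ex).filter
            (fun u => decide (x ∈ (pvBuildA ex).1.getD u PySem.Set.empty)) :=
          List.mem_filter.mpr ⟨(hEV u x hedge).2.1,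
            decide_eq_true (show x ∈ (pvBuildA ex).1.getD u PySem.Set.empty from hedge)⟩
        rw [List.length_eq_zero_iff] at hcnt0
        rw [hcnt0] at humem
        exact absurd humem List.not_mem_nil
    have hmain := pvKahn_main hVnd hEV h2 (pvNodes ex).length []
      ((pvNodes ex).filter (fun k => (pvBuildA ex).2.getD k 0 == 0)) (pvBuildA ex).2 hinv
      (by simp)
    simp only [List.length_nil] at hmain
    rw [hqueue, beq_iff_eq, hmain]
    have hcex : ∃ c : Char, c ∈ pvChars ex := by
      have hVne : pvNodes ex ≠ [] := fun h => hemp (by rw [h]; rfl)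
      obtain ⟨c, hc⟩ := List.exists_mem_of_ne_nil _ hVne
      exact ⟨c, (pvNodes_mem ex c).mp hc⟩
    constructor
    · intro hnb
      refine ⟨hcex, ?_⟩
      rintro ⟨S, hne, hcl⟩
      apply hnb
      refine ⟨S, hne, ?_, ?_⟩
      · intro v hv
        obtain ⟨u, -, hR⟩ := hcl v hv
        exact (pvNodes_mem ex v).mpr (pvR_right_mem hR)
      · intro v hv
        obtain ⟨u, huS, hR⟩ := hcl v hv
        exact ⟨u, huS, (h1 u v).mpr hR⟩
    · rintro ⟨-, hnc⟩ ⟨S, hne, hSV, hcl⟩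
      apply hnc
      refine ⟨S, hne, fun v hv => ?_⟩
      obtain ⟨u, huS, hedge⟩ := hcl v hv
      exact ⟨u, huS, (h1 u v).mp hedge⟩

-- ---------- B side: first/last ----------

lemma pvFL_fold_get? (l : List (Int × Char)) :
    ∀ (d1 d2 : PySem.Dict Char Int) (c : Char),
    ((l.foldl (fun (fl : PySem.Dict Char Int × PySem.Dict Char Int) ic =>
        ((if fl.1.contains ic.2 then fl.1 else fl.1.insert ic.2 ic.1), fl.2.insert ic.2 ic.1))
        (d1, d2)).1.get? c
      = (d1.get? c).or ((l.find? (fun q => q.2 == c)).map (·.1))) ∧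
    ((l.foldl (fun (fl : PySem.Dict Char Int × PySem.Dict Char Int) ic =>
        ((if fl.1.contains ic.2 then fl.1 else fl.1.insert ic.2 ic.1), fl.2.insert ic.2 ic.1))
        (d1, d2)).2.get? c
      = ((l.reverse.find? (fun q => q.2 == c)).map (·.1)).or (d2.get? c)) := by
  induction l with
  | nil => simp
  | cons q t ih =>
    intro d1 d2 c
    simp only [List.foldl_cons]
    obtain ⟨ih1, ih2⟩ := ih (if d1.contains q.2 then d1 else d1.insert q.2 q.1)
      (d2.insert q.2 q.1) c
    constructor
    · rw [ih1]
      by_cases hc : q.2 = c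
      · subst hc
        by_cases hcont : d1.contains q.2 = true
        · have hsome : (d1.get? q.2).isSome := by
            rw [← PySem.Dict.contains_eq_isSome_get?]
            exact hcont
          obtain ⟨v, hv⟩ := Option.isSome_iff_exists.mp hsome
          simp [hcont, hv]
        · have hget : d1.get? q.2 = none := by
            rcases h : d1.get? q.2 with - | v
            · rfl
            · exact absurd (by rw [PySem.Dict.contains_eq_isSome_get?, h]; rfl) hcont
          simp [Bool.eq_false_iff.mpr hcont, hget, PySem.Dict.get?_insert_self]
      · have hfind : List.find? (fun q' => q'.2 == c) (q :: t) =
            List.find? (fun q' => q'.2 == c) t := by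
          rw [List.find?_cons_of_neg]
          simp [hc]
        rw [hfind]
        by_cases hcont : d1.contains q.2 = true
        · simp [hcont]
        · simp only [Bool.eq_false_iff.mpr hcont, Bool.false_eq_true, if_false]
          rw [PySem.Dict.get?_insert_of_ne _ _ (fun h => hc h.symm)]
    · rw [ih2]
      rw [List.reverse_cons, List.find?_append]
      by_cases hc : q.2 = c
      · subst hc
        rw [PySem.Dict.get?_insert_self]
        simp
      · rw [PySem.Dict.get?_insert_of_ne _ _ (fun h => hc h.symm)]
        have : List.find? (fun q' => q'.2 == c) [q] = none := by
          simp [hc]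
        rw [this]
        simp

lemma pvFL_fst_get? (cs : List Char) (c : Char) :
    (pvFL cs).1.get? c = ((PySem.List.enumerate cs 0).find? (fun q => q.2 == c)).map (·.1) := by
  unfold pvFL
  rw [(pvFL_fold_get? (PySem.List.enumerate cs 0) PySem.Dict.empty PySem.Dict.empty c).1]
  simp [PySem.Dict.get?_empty]

lemma pvFL_snd_get? (cs : List Char) (c : Char) :
    (pvFL cs).2.get? c =
      ((PySem.List.enumerate cs 0).reverse.find? (fun q => q.2 == c)).map (·.1) := by
  unfold pvFL
  rw [(pvFL_fold_get? (PySem.List.enumerate cs 0) PySem.Dict.empty PySem.Dict.empty c).2]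
  simp [PySem.Dict.get?_empty]

lemma pvFL_fold_keys_nodup (l : List (Int × Char)) :
    ∀ (d1 d2 : PySem.Dict Char Int), d1.keys.Nodup → d2.keys.Nodup →
    ((l.foldl (fun (fl : PySem.Dict Char Int × PySem.Dict Char Int) ic =>
        ((if fl.1.contains ic.2 then fl.1 else fl.1.insert ic.2 ic.1), fl.2.insert ic.2 ic.1))
        (d1, d2)).1.keys.Nodup ∧
     (l.foldl (fun (fl : PySem.Dict Char Int × PySem.Dict Char Int) ic =>
        ((if fl.1.contains ic.2 then fl.1 else fl.1.insert ic.2 ic.1), fl.2.insert ic.2 ic.1))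
        (d1, d2)).2.keys.Nodup) := by
  induction l with
  | nil => intro d1 d2 h1 h2; exact ⟨h1, h2⟩
  | cons q t ih =>
    intro d1 d2 h1 h2
    simp only [List.foldl_cons]
    apply ih
    · by_cases hcont : d1.contains q.2 = true
      · simpa [hcont] using h1
      · simpa [Bool.eq_false_iff.mpr hcont] using PySem.Dict.nodup_keys_insert _ _ _ h1
    · exact PySem.Dict.nodup_keys_insert _ _ _ h2

lemma pvFL_keys_nodup (cs : List Char) :
    (pvFL cs).1.keys.Nodup ∧ (pvFL cs).2.keys.Nodup := by
  unfold pvFL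
  exact pvFL_fold_keys_nodup _ _ _ PySem.Dict.nodup_keys_empty PySem.Dict.nodup_keys_empty

lemma pvFirst_spec (cs : List Char) (c : Char) (fa : Int) :
    (pvFL cs).1.get? c = some fa ↔
      ∃ k : Nat, fa = (k : Int) ∧ cs[k]? = some c ∧ ∀ m < k, cs[m]? ≠ some c := by
  rw [pvFL_fst_get?, Option.map_eq_some_iff]
  constructor
  · rintro ⟨q, hfind, hfa⟩
    rw [List.find?_eq_some_iff_getElem] at hfind
    obtain ⟨hpq, i, hi, hqi, hmin⟩ := hfind
    have hlen : i < cs.length := by simpa [PySem.List.length_enumerate] using hi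
    rw [PySem.List.getElem_enumerate] at hqi
    have hcs : cs[i] = c := by
      rw [← hqi] at hpq
      simpa using hpq
    refine ⟨i, ?_, ?_, ?_⟩
    · rw [← hfa, ← hqi]
      simp
    · rw [List.getElem?_eq_getElem hlen, hcs]
    · intro m hm hceq
      have hmlen : m < cs.length := lt_trans hm hlen
      have hnot := hmin m hm
      rw [PySem.List.getElem_enumerate] at hnot
      rw [List.getElem?_eq_getElem hmlen] at hceq
      have hmc : cs[m] = c := by injection hceq
      simp [hmc] at hnot
  · rintro ⟨k, rfl, hk, hmin⟩
    obtain ⟨hklen, hck⟩ := List.getElem?_eq_some_iff.mp hk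
    refine ⟨((k : Int), c), ?_, by simp⟩
    rw [List.find?_eq_some_iff_getElem]
    refine ⟨by simp, k, by simpa [PySem.List.length_enumerate] using hklen, ?_, ?_⟩
    · rw [PySem.List.getElem_enumerate]
      simp [hck]
    · intro j hj
      rw [PySem.List.getElem_enumerate]
      have hjlen : j < cs.length := lt_trans hj hklen
      have hne := hmin j hj
      rw [List.getElem?_eq_getElem hjlen] at hne
      simp only [Bool.not_eq_true', beq_eq_false_iff_ne]
      intro h
      exact hne (by rw [h])

lemma pvLast_spec (cs : List Char) (c : Char) (lb : Int) :
    (pvFL cs).2.get? c = some lb ↔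
      ∃ k : Nat, lb = (k : Int) ∧ cs[k]? = some c ∧ ∀ m, k < m → cs[m]? ≠ some c := by
  rw [pvFL_snd_get?, Option.map_eq_some_iff]
  have hlenrev : (PySem.List.enumerate cs 0).reverse.length = cs.length := by
    simp [PySem.List.length_enumerate]
  constructor
  · rintro ⟨q, hfind, hfa⟩
    rw [List.find?_eq_some_iff_getElem] at hfind
    obtain ⟨hpq, r, hr, hqr, hmin⟩ := hfind
    have hrlen : r < cs.length := by rwa [hlenrev] at hr
    rw [List.getElem_reverse] at hqr
    simp only [PySem.List.length_enumerate, PySem.List.getElem_enumerate] at hqr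
    have hcs : cs[cs.length - 1 - r]'(by omega) = c := by
      rw [← hqr] at hpq
      simpa using hpq
    refine ⟨cs.length - 1 - r, ?_, ?_, ?_⟩
    · rw [← hfa, ← hqr]
      simp
    · rw [List.getElem?_eq_getElem (by omega : cs.length - 1 - r < cs.length), hcs]
    · intro m hkm hceq
      by_cases hmlen : m < cs.length
      · have hnot := hmin (cs.length - 1 - m) (by omega)
        rw [List.getElem_reverse] at hnot
        simp only [PySem.List.length_enumerate, PySem.List.getElem_enumerate] at hnot
        have hidx : cs.length - 1 - (cs.length - 1 - m) = m := by omega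
        simp only [hidx] at hnot
        rw [List.getElem?_eq_getElem hmlen] at hceq
        have hmc : cs[m] = c := by injection hceq
        simp [hmc] at hnot
      · rw [List.getElem?_eq_none_iff.mpr (by omega)] at hceq
        exact absurd hceq (by simp)
  · rintro ⟨k, rfl, hk, hmax⟩
    obtain ⟨hklen, hck⟩ := List.getElem?_eq_some_iff.mp hk
    refine ⟨((k : Int), c), ?_, by simp⟩
    rw [List.find?_eq_some_iff_getElem]
    refine ⟨by simp, cs.length - 1 - k, by rw [hlenrev]; omega, ?_, ?_⟩
    · rw [List.getElem_reverse]
      simp only [PySem.List.length_enumerate, PySem.List.getElem_enumerate]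
      have hidx : cs.length - 1 - (cs.length - 1 - k) = k := by omega
      simp only [hidx]
      simp [hck]
    · intro j hj
      rw [List.getElem_reverse]
      simp only [PySem.List.length_enumerate, PySem.List.getElem_enumerate]
      have hne := hmax (cs.length - 1 - j) (by omega)
      have hjlen : cs.length - 1 - j < cs.length := by omega
      rw [List.getElem?_eq_getElem hjlen] at hne
      simp only [Bool.not_eq_true', beq_eq_false_iff_ne]
      intro h
      exact hne (by rw [h])

lemma pvPairCond (cs : List Char) (a b : Char) :
    (∃ fa lb : Int, (pvFL cs).1.get? a = some fa ∧ (pvFL cs).2.get? b = some lb ∧ fa < lb) ↔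
      pvPairIn cs a b := by
  constructor
  · rintro ⟨fa, lb, hf, hl, hlt⟩
    rw [pvFirst_spec] at hf
    rw [pvLast_spec] at hl
    obtain ⟨ka, rfl, hka, -⟩ := hf
    obtain ⟨kb, rfl, hkb, -⟩ := hl
    exact ⟨ka, kb, by exact_mod_cast hlt, hka, hkb⟩
  · rintro ⟨i, j, hij, hi, hj⟩
    obtain ⟨hilen, hci⟩ := List.getElem?_eq_some_iff.mp hi
    obtain ⟨hjlen, hcj⟩ := List.getElem?_eq_some_iff.mp hj
    have hfsome : ((PySem.List.enumerate cs 0).find? (fun q => q.2 == a)).isSome := by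
      rw [List.find?_isSome]
      exact ⟨((i : Int), a), (PySem.List.mem_enumerate_iff _ _ _).mpr
        ⟨i, hilen, by simp [hci]⟩, by simp⟩
    have hlsome : ((PySem.List.enumerate cs 0).reverse.find? (fun q => q.2 == b)).isSome := by
      rw [List.find?_isSome]
      exact ⟨((j : Int), b), List.mem_reverse.mpr ((PySem.List.mem_enumerate_iff _ _ _).mpr
        ⟨j, hjlen, by simp [hcj]⟩), by simp⟩
    have hf : ((pvFL cs).1.get? a).isSome := by
      rw [pvFL_fst_get?]
      simpa using hfsome
    have hl : ((pvFL cs).2.get? b).isSome := by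
      rw [pvFL_snd_get?]
      simpa using hlsome
    obtain ⟨fa, hfa⟩ := Option.isSome_iff_exists.mp hf
    obtain ⟨lb, hlb⟩ := Option.isSome_iff_exists.mp hl
    obtain ⟨ka, rfl, hka, hkamin⟩ := (pvFirst_spec cs a fa).mp hfa
    obtain ⟨kb, rfl, hkb, hkbmax⟩ := (pvLast_spec cs b lb).mp hlb
    have hkai : ka ≤ i := by
      by_contra hgt
      exact hkamin i (by omega) hi
    have hjkb : j ≤ kb := by
      by_contra hgt
      exact hkbmax j (by omega) hj
    exact ⟨ka, kb, hfa, hlb, by exact_mod_cast (by omega : ka < kb)⟩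

-- ---------- B side: preds construction ----------

-- one step of the inner loop
lemma pvInnerB_step_mem (a : Char) (fa : Int) (blb : Char × Int)
    (preds : PySem.Dict Char (PySem.Set Char)) (b x : Char) :
    x ∈ (if a ≠ blb.1 ∧ fa < blb.2 then
          preds.insert blb.1 (PySem.Set.add (preds.getD blb.1 PySem.Set.empty) a)
        else preds).getD b PySem.Set.empty ↔
      x ∈ preds.getD b PySem.Set.empty ∨ (x = a ∧ a ≠ b ∧ b = blb.1 ∧ fa < blb.2) := by
  by_cases hcond : a ≠ blb.1 ∧ fa < blb.2
  · rw [if_pos hcond, PySem.Dict.getD_insert]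
    by_cases hb : b = blb.1
    · subst hb
      rw [if_pos rfl, PySem.Set.mem_add]
      constructor
      · rintro (hx | rfl)
        · exact Or.inl hx
        · exact Or.inr ⟨rfl, hcond.1, rfl, hcond.2⟩
      · rintro (hx | ⟨rfl, -, -, -⟩)
        · exact Or.inl hx
        · exact Or.inr rfl
    · rw [if_neg hb]
      simp [hb]
  · rw [if_neg hcond]
    have hno : ¬(x = a ∧ a ≠ b ∧ b = blb.1 ∧ fa < blb.2) := by
      rintro ⟨rfl, hab, rfl, hlt⟩
      exact hcond ⟨hab, hlt⟩
    simp [hno]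

lemma pvInnerB_mem (a : Char) (fa : Int) (L : List (Char × Int)) :
    ∀ (preds : PySem.Dict Char (PySem.Set Char)) (b x : Char),
    (x ∈ (pvInnerB a fa L preds).getD b PySem.Set.empty ↔
      x ∈ preds.getD b PySem.Set.empty ∨ (x = a ∧ a ≠ b ∧ ∃ lb, (b, lb) ∈ L ∧ fa < lb)) := by
  induction L with
  | nil =>
    intro preds b x
    simp [pvInnerB]
  | cons blb t ih =>
    intro preds b x
    have hstep : pvInnerB a fa (blb :: t) preds = pvInnerB a fa t
        (if a ≠ blb.1 ∧ fa < blb.2 then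
          preds.insert blb.1 (PySem.Set.add (preds.getD blb.1 PySem.Set.empty) a)
        else preds) := by
      simp only [pvInnerB, List.foldl_cons]
    rw [hstep, ih, pvInnerB_step_mem]
    constructor
    · rintro ((hx | ⟨rfl, hab, rfl, hlt⟩) | ⟨rfl, hab, lb, hmem, hlt⟩)
      · exact Or.inl hx
      · exact Or.inr ⟨rfl, hab, blb.2, by simp, hlt⟩
      · exact Or.inr ⟨rfl, hab, lb, List.mem_cons_of_mem _ hmem, hlt⟩
    · rintro (hx | ⟨rfl, hab, lb, hmem, hlt⟩)
      · exact Or.inl (Or.inl hx)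
      · rcases List.mem_cons.mp hmem with heq | hmemt
        · have hb1 : b = blb.1 := by rw [← heq]
          have hb2 : lb = blb.2 := by rw [← heq]
          exact Or.inl (Or.inr ⟨rfl, hab, hb1, hb2 ▸ hlt⟩)
        · exact Or.inr ⟨rfl, hab, lb, hmemt, hlt⟩

lemma pvInnerB_keys (a : Char) (fa : Int) (L : List (Char × Int)) :
    ∀ (preds : PySem.Dict Char (PySem.Set Char)) (b : Char),
    (b ∈ (pvInnerB a fa L preds).keys ↔
      b ∈ preds.keys ∨ (a ≠ b ∧ ∃ lb, (b, lb) ∈ L ∧ fa < lb)) := by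
  induction L with
  | nil =>
    intro preds b
    simp [pvInnerB]
  | cons blb t ih =>
    intro preds b
    have hstep : pvInnerB a fa (blb :: t) preds = pvInnerB a fa t
        (if a ≠ blb.1 ∧ fa < blb.2 then
          preds.insert blb.1 (PySem.Set.add (preds.getD blb.1 PySem.Set.empty) a)
        else preds) := by
      simp only [pvInnerB, List.foldl_cons]
    rw [hstep, ih]
    have hkeys : b ∈ (if a ≠ blb.1 ∧ fa < blb.2 then
          preds.insert blb.1 (PySem.Set.add (preds.getD blb.1 PySem.Set.empty) a)
        else preds).keys ↔ b ∈ preds.keys ∨ (a ≠ blb.1 ∧ fa < blb.2 ∧ b = blb.1) := by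
      by_cases hcond : a ≠ blb.1 ∧ fa < blb.2
      · rw [if_pos hcond, PySem.Dict.mem_keys_insert]
        constructor
        · rintro (rfl | hb)
          · exact Or.inr ⟨hcond.1, hcond.2, rfl⟩
          · exact Or.inl hb
        · rintro (hb | ⟨-, -, rfl⟩)
          · exact Or.inr hb
          · exact Or.inl rfl
      · rw [if_neg hcond]
        have hno : ¬(a ≠ blb.1 ∧ fa < blb.2 ∧ b = blb.1) := by
          rintro ⟨h1, h2, rfl⟩
          exact hcond ⟨h1, h2⟩
        simp [hno]
    rw [hkeys]
    constructor
    · rintro ((hb | ⟨h1, h2, rfl⟩) | ⟨hab, lb, hmem, hlt⟩)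
      · exact Or.inl hb
      · exact Or.inr ⟨h1, blb.2, List.mem_cons_self, h2⟩
      · exact Or.inr ⟨hab, lb, List.mem_cons_of_mem _ hmem, hlt⟩
    · rintro (hb | ⟨hab, lb, hmem, hlt⟩)
      · exact Or.inl (Or.inl hb)
      · rcases List.mem_cons.mp hmem with heq | hmemt
        · have hb1 : b = blb.1 := by rw [← heq]
          have hb2 : lb = blb.2 := by rw [← heq]
          exact Or.inl (Or.inr ⟨hb1 ▸ hab, hb2 ▸ hlt, hb1⟩)
        · exact Or.inr ⟨hab, lb, hmemt, hlt⟩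

lemma pvGetD_setdefault (d : PySem.Dict Char (PySem.Set Char)) (k b : Char) :
    (d.setdefault k PySem.Set.empty).getD b PySem.Set.empty = d.getD b PySem.Set.empty := by
  by_cases hb : b = k
  · subst hb
    exact PySem.Dict.getD_setdefault_self d b PySem.Set.empty PySem.Set.empty
  · rw [PySem.Dict.getD_eq_get?_getD, PySem.Dict.get?_setdefault_of_ne d _ (hb)
      (k := k), ← PySem.Dict.getD_eq_get?_getD]

lemma pvMem_keys_setdefault (d : PySem.Dict Char (PySem.Set Char)) (k b : Char)
    (v : PySem.Set Char) : b ∈ (d.setdefault k v).keys ↔ b = k ∨ b ∈ d.keys := by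
  rw [← PySem.Dict.contains_iff_mem_keys, PySem.Dict.contains_setdefault,
    ← PySem.Dict.contains_iff_mem_keys]
  simp

lemma pvFL_fst_items (cs : List Char) (b : Char) (fa : Int) :
    (b, fa) ∈ (pvFL cs).1.items ↔ (pvFL cs).1.get? b = some fa :=
  (PySem.Dict.get?_eq_some_iff_mem_items _ _ _ (pvFL_keys_nodup cs).1).symm

lemma pvFL_snd_items (cs : List Char) (b : Char) (lb : Int) :
    (b, lb) ∈ (pvFL cs).2.items ↔ (pvFL cs).2.get? b = some lb :=
  (PySem.Dict.get?_eq_some_iff_mem_items _ _ _ (pvFL_keys_nodup cs).2).symm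

lemma pvFL_fst_isSome (cs : List Char) (b : Char) :
    ((pvFL cs).1.get? b).isSome = true ↔ b ∈ cs := by
  rw [pvFL_fst_get?, Option.isSome_map, List.find?_isSome]
  constructor
  · rintro ⟨q, hq, hpq⟩
    obtain ⟨k, hk, rfl⟩ := (PySem.List.mem_enumerate_iff _ _ _).mp hq
    have : cs[k] = b := by simpa using hpq
    exact this ▸ List.getElem_mem hk
  · intro hb
    obtain ⟨k, hk, hcb⟩ := List.getElem_of_mem hb
    exact ⟨((k : Int), b), (PySem.List.mem_enumerate_iff _ _ _).mpr
      ⟨k, hk, by simp [hcb]⟩, by simp⟩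

lemma pvFL_snd_isSome (cs : List Char) (b : Char) :
    ((pvFL cs).2.get? b).isSome = true ↔ b ∈ cs := by
  rw [pvFL_snd_get?, Option.isSome_map, List.find?_isSome]
  constructor
  · rintro ⟨q, hq, hpq⟩
    obtain ⟨k, hk, rfl⟩ := (PySem.List.mem_enumerate_iff _ _ _).mp (List.mem_reverse.mp hq)
    have : cs[k] = b := by simpa using hpq
    exact this ▸ List.getElem_mem hk
  · intro hb
    obtain ⟨k, hk, hcb⟩ := List.getElem_of_mem hb
    exact ⟨((k : Int), b), List.mem_reverse.mpr ((PySem.List.mem_enumerate_iff _ _ _).mpr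
      ⟨k, hk, by simp [hcb]⟩), by simp⟩

lemma pvAddOut_aux_mem (L2 : List (Char × Int)) :
    ∀ (L1 : List (Char × Int)) (preds : PySem.Dict Char (PySem.Set Char)) (b x : Char),
    x ∈ (L1.foldl (fun preds afa =>
          (pvInnerB afa.1 afa.2 L2 preds).setdefault afa.1 PySem.Set.empty) preds).getD b
        PySem.Set.empty ↔
      x ∈ preds.getD b PySem.Set.empty ∨
        ∃ fa', (x, fa') ∈ L1 ∧ x ≠ b ∧ ∃ lb, (b, lb) ∈ L2 ∧ fa' < lb := by
  intro L1
  induction L1 with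
  | nil =>
    intro preds b x
    simp
  | cons afa t ih =>
    intro preds b x
    simp only [List.foldl_cons]
    rw [ih, pvGetD_setdefault, pvInnerB_mem]
    constructor
    · rintro ((hx | ⟨rfl, hab, lb, hm, hlt⟩) | ⟨fa', hm1, hxb, lb, hm2, hlt⟩)
      · exact Or.inl hx
      · exact Or.inr ⟨afa.2, by simp, hab, lb, hm, hlt⟩
      · exact Or.inr ⟨fa', List.mem_cons_of_mem _ hm1, hxb, lb, hm2, hlt⟩
    · rintro (hx | ⟨fa', hm1, hxb, lb, hm2, hlt⟩)
      · exact Or.inl (Or.inl hx)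
      · rcases List.mem_cons.mp hm1 with heq | hm1t
        · have h1 : x = afa.1 := by rw [← heq]
          have h2 : fa' = afa.2 := by rw [← heq]
          exact Or.inl (Or.inr ⟨h1, h1 ▸ hxb, lb, hm2, h2 ▸ hlt⟩)
        · exact Or.inr ⟨fa', hm1t, hxb, lb, hm2, hlt⟩

lemma pvAddOut_mem (preds : PySem.Dict Char (PySem.Set Char)) (cs : List Char) (b x : Char) :
    x ∈ (pvAddOut preds cs).getD b PySem.Set.empty ↔
      x ∈ preds.getD b PySem.Set.empty ∨ (x ≠ b ∧ pvPairIn cs x b) := by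
  unfold pvAddOut
  rw [pvAddOut_aux_mem]
  apply or_congr Iff.rfl
  constructor
  · rintro ⟨fa', hm1, hxb, lb, hm2, hlt⟩
    refine ⟨hxb, (pvPairCond cs x b).mp ⟨fa', lb, ?_, ?_, hlt⟩⟩
    · exact (pvFL_fst_items cs x fa').mp hm1
    · exact (pvFL_snd_items cs b lb).mp hm2
  · rintro ⟨hxb, hpair⟩
    obtain ⟨fa, lb, hf, hl, hlt⟩ := (pvPairCond cs x b).mpr hpair
    exact ⟨fa, (pvFL_fst_items cs x fa).mpr hf, hxb, lb, (pvFL_snd_items cs b lb).mpr hl, hlt⟩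

lemma pvAddOut_aux_keys (L2 : List (Char × Int)) :
    ∀ (L1 : List (Char × Int)) (preds : PySem.Dict Char (PySem.Set Char)) (b : Char),
    b ∈ (L1.foldl (fun preds afa =>
          (pvInnerB afa.1 afa.2 L2 preds).setdefault afa.1 PySem.Set.empty) preds).keys ↔
      b ∈ preds.keys ∨ (∃ q ∈ L1, q.1 = b) ∨
        (∃ q ∈ L1, ∃ p ∈ L2, q.1 ≠ p.1 ∧ q.2 < p.2 ∧ p.1 = b) := by
  intro L1
  induction L1 with
  | nil =>
    intro preds b
    simp
  | cons afa t ih =>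
    intro preds b
    simp only [List.foldl_cons]
    rw [ih, pvMem_keys_setdefault, pvInnerB_keys]
    constructor
    · rintro ((rfl | (hb | ⟨hab, lb, hm, hlt⟩)) | (⟨q, hq, rfl⟩ | ⟨q, hq, p, hp, h1, h2, rfl⟩))
      · exact Or.inr (Or.inl ⟨afa, by simp, rfl⟩)
      · exact Or.inl hb
      · exact Or.inr (Or.inr ⟨afa, by simp, (b, lb), hm, hab, hlt, rfl⟩)
      · exact Or.inr (Or.inl ⟨q, List.mem_cons_of_mem _ hq, rfl⟩)
      · exact Or.inr (Or.inr ⟨q, List.mem_cons_of_mem _ hq, p, hp, h1, h2, rfl⟩)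
    · rintro (hb | (⟨q, hq, rfl⟩ | ⟨q, hq, p, hp, h1, h2, rfl⟩))
      · exact Or.inl (Or.inr (Or.inl hb))
      · rcases List.mem_cons.mp hq with heq | hqt
        · exact Or.inl (Or.inl (by rw [← heq]))
        · exact Or.inr (Or.inl ⟨q, hqt, rfl⟩)
      · rcases List.mem_cons.mp hq with heq | hqt
        · subst heq
          exact Or.inl (Or.inr (Or.inr ⟨h1, p.2, by simpa using hp, h2⟩))
        · exact Or.inr (Or.inr ⟨q, hqt, p, hp, h1, h2, rfl⟩)

lemma pvAddOut_keys (preds : PySem.Dict Char (PySem.Set Char)) (cs : List Char) (b : Char) :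
    b ∈ (pvAddOut preds cs).keys ↔ b ∈ preds.keys ∨ b ∈ cs := by
  unfold pvAddOut
  rw [pvAddOut_aux_keys]
  apply or_congr Iff.rfl
  constructor
  · rintro (⟨q, hq, rfl⟩ | ⟨q, hq, p, hp, h1, h2, rfl⟩)
    · have : (pvFL cs).1.get? q.1 = some q.2 := (pvFL_fst_items cs q.1 q.2).mp (by simpa using hq)
      exact (pvFL_fst_isSome cs q.1).mp (by rw [this]; rfl)
    · have : (pvFL cs).2.get? p.1 = some p.2 := (pvFL_snd_items cs p.1 p.2).mp (by simpa using hp)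
      exact (pvFL_snd_isSome cs p.1).mp (by rw [this]; rfl)
  · intro hb
    obtain ⟨fa, hfa⟩ := Option.isSome_iff_exists.mp ((pvFL_fst_isSome cs b).mpr hb)
    exact Or.inl ⟨(b, fa), (pvFL_fst_items cs b fa).mpr hfa, rfl⟩

lemma pvR_append_singleton (t : List (String × String)) (p : String × String) (x b : Char) :
    pvR (t ++ [p]) x b ↔ pvR t x b ∨ (x ≠ b ∧ pvPairIn p.2.toList x b) := by
  unfold pvR pvPairIn
  constructor
  · rintro ⟨hxb, q, hq, i, j, hij, hi, hj⟩
    rcases List.mem_append.mp hq with hqt | hqp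
    · exact Or.inl ⟨hxb, q, hqt, i, j, hij, hi, hj⟩
    · have hqp' : q = p := by simpa using hqp
      subst hqp'
      exact Or.inr ⟨hxb, i, j, hij, hi, hj⟩
  · rintro (⟨hxb, q, hqt, i, j, hij, hi, hj⟩ | ⟨hxb, i, j, hij, hi, hj⟩)
    · exact ⟨hxb, q, List.mem_append_left _ hqt, i, j, hij, hi, hj⟩
    · exact ⟨hxb, p, List.mem_append_right _ (by simp), i, j, hij, hi, hj⟩

lemma pvBuildPreds_step (t : List (String × String)) (p : String × String) :
    pvBuildPreds (t ++ [p]) =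
      (if p.2 = "" then pvBuildPreds t else pvAddOut (pvBuildPreds t) p.2.toList) := by
  unfold pvBuildPreds
  rw [List.foldl_append]
  simp

lemma pvBuildPreds_mem (ex : List (String × String)) (b x : Char) :
    x ∈ (pvBuildPreds ex).getD b PySem.Set.empty ↔ pvR ex x b := by
  induction ex using List.reverseRecOn with
  | nil =>
    simp only [pvBuildPreds, List.foldl_nil, PySem.Dict.getD_empty, pvR]
    simp [PySem.Set.empty]
  | append_singleton t p ih =>
    rw [pvBuildPreds_step, pvR_append_singleton]
    by_cases hp : p.2 = ""
    · rw [if_pos hp, ih]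
      have hnop : ¬ (x ≠ b ∧ pvPairIn p.2.toList x b) := by
        rintro ⟨-, i, j, hij, hi, -⟩
        rw [hp] at hi
        simp at hi
      simp [hnop]
    · rw [if_neg hp, pvAddOut_mem, ih]

lemma pvBuildPreds_keys (ex : List (String × String)) (b : Char) :
    b ∈ (pvBuildPreds ex).keys ↔ b ∈ pvChars ex := by
  induction ex using List.reverseRecOn with
  | nil =>
    simp [pvBuildPreds, pvChars, PySem.Dict.empty]
  | append_singleton t p ih =>
    rw [pvBuildPreds_step]
    have hchars : ∀ c : Char, c ∈ pvChars (t ++ [p]) ↔ c ∈ pvChars t ∨ c ∈ p.2.toList := by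
      intro c
      simp [pvChars]
    by_cases hp : p.2 = ""
    · rw [if_pos hp, ih, hchars]
      simp [hp]
    · rw [if_neg hp, pvAddOut_keys, ih, hchars]

-- ---------- B side: the elimination loop ----------

lemma pvKeep_mem (preds : PySem.Dict Char (PySem.Set Char)) (remaining : List Char) (v : Char) :
    v ∈ pvKeep preds remaining ↔
      v ∈ remaining ∧ ∃ u ∈ preds.getD v PySem.Set.empty, u ∈ remaining := by
  unfold pvKeep
  rw [List.mem_filter]
  have hne : ∀ (l : List Char), (!l.isEmpty) = true ↔ ∃ x, x ∈ l := by
    intro l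
    cases l <;> simp
  rw [hne]
  constructor
  · rintro ⟨hv, x, hx⟩
    exact ⟨hv, x, ((PySem.Set.mem_inter _ _ _).mp hx).1, ((PySem.Set.mem_inter _ _ _).mp hx).2⟩
  · rintro ⟨hv, u, hu1, hu2⟩
    exact ⟨hv, u, (PySem.Set.mem_inter _ _ _).mpr ⟨hu1, hu2⟩⟩

lemma pvKeep_subset (preds : PySem.Dict Char (PySem.Set Char)) (remaining : List Char) :
    ∀ x ∈ pvKeep preds remaining, x ∈ remaining := by
  intro x hx
  exact ((pvKeep_mem preds remaining x).mp hx).1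

lemma pvElim_iff (preds : PySem.Dict Char (PySem.Set Char)) (remaining : List Char) :
    pvElimLoop preds remaining = true ↔
      ¬ ∃ S : List Char, S ≠ [] ∧ (∀ x ∈ S, x ∈ remaining) ∧
        ∀ v ∈ S, ∃ u ∈ S, u ∈ preds.getD v PySem.Set.empty := by
  fun_induction pvElimLoop preds remaining with
  | case1 rem h =>
    have hkr : pvKeep preds rem = rem :=
      List.Sublist.eq_of_length (by simp only [pvKeep]; exact List.filter_sublist) h
    cases rem with
    | nil =>
      simp only [List.isEmpty_nil, true_iff]
      rintro ⟨S, hne, hsub, -⟩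
      exact hne (List.eq_nil_iff_forall_not_mem.mpr (fun x hx => absurd (hsub x hx) List.not_mem_nil))
    | cons r rs =>
      have hfalse : (r :: rs).isEmpty = false := rfl
      rw [hfalse]
      simp only [Bool.false_eq_true, false_iff, not_not]
      refine ⟨r :: rs, by simp, fun x hx => hx, ?_⟩
      intro v hv
      have hvk : v ∈ pvKeep preds (r :: rs) := by rw [hkr]; exact hv
      obtain ⟨-, u, hu1, hu2⟩ := (pvKeep_mem preds (r :: rs) v).mp hvk
      exact ⟨u, hu2, hu1⟩
  | case2 rem h ih =>
    rw [ih]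
    apply not_congr
    constructor
    · rintro ⟨S, hne, hsub, hcl⟩
      exact ⟨S, hne, fun x hx => pvKeep_subset preds rem x (hsub x hx), hcl⟩
    · rintro ⟨S, hne, hsub, hcl⟩
      refine ⟨S, hne, fun v hv => ?_, hcl⟩
      obtain ⟨u, huS, hupred⟩ := hcl v hv
      exact (pvKeep_mem preds rem v).mpr ⟨hsub v hv, u, hupred, hsub u huS⟩

lemma pvB_iff (ex : List (String × String)) :
    glyph_output_order_acyclic_alt ex = true ↔
      ((∃ c : Char, c ∈ pvChars ex) ∧ ¬ pvHasCore ex) := by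
  have hdef : glyph_output_order_acyclic_alt ex =
      if (pvBuildPreds ex).items.isEmpty then false
      else pvElimLoop (pvBuildPreds ex) (PySem.Set.ofList (pvBuildPreds ex).keys) := rfl
  rw [hdef]
  by_cases hemp : (pvBuildPreds ex).items.isEmpty = true
  · rw [if_pos hemp]
    have hkeys : (pvBuildPreds ex).keys = [] := by
      have hit : (pvBuildPreds ex).items = [] := List.isEmpty_iff.mp hemp
      simp only [PySem.Dict.keys, hit, List.map_nil]
    simp only [Bool.false_eq_true, false_iff]
    rintro ⟨⟨c, hc⟩, -⟩
    have : c ∈ (pvBuildPreds ex).keys := (pvBuildPreds_keys ex c).mpr hc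
    rw [hkeys] at this
    exact absurd this List.not_mem_nil
  · rw [if_neg hemp, pvElim_iff]
    have hc : ∃ c : Char, c ∈ pvChars ex := by
      have hne : (pvBuildPreds ex).items ≠ [] := fun h => hemp (by rw [h]; rfl)
      obtain ⟨q, hq⟩ := List.exists_mem_of_ne_nil _ hne
      refine ⟨q.1, (pvBuildPreds_keys ex q.1).mp ?_⟩
      simp only [PySem.Dict.keys]
      exact List.mem_map_of_mem hq
    constructor
    · intro helim
      refine ⟨hc, ?_⟩
      rintro ⟨S, hne, hcl⟩
      apply helim
      refine ⟨S, hne, ?_, ?_⟩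
      · intro v hv
        obtain ⟨u, -, hR⟩ := hcl v hv
        rw [PySem.Set.mem_ofList]
        exact (pvBuildPreds_keys ex v).mpr (pvR_right_mem hR)
      · intro v hv
        obtain ⟨u, huS, hR⟩ := hcl v hv
        exact ⟨u, huS, (pvBuildPreds_mem ex v u).mpr hR⟩
    · rintro ⟨-, hnc⟩
      rintro ⟨S, hne, hsub, hcl⟩
      apply hnc
      refine ⟨S, hne, ?_⟩
      intro v hv
      obtain ⟨u, huS, hmem⟩ := hcl v hv
      exact ⟨u, huS, (pvBuildPreds_mem ex v u).mp hmem⟩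

-- ===== VERDICT (by name: the statement is the Claim_ definition above) =====
theorem glyph_output_order_acyclic_spec : Claim_equal_glyph_output_order_acyclic := by
  intro examples _
  unfold Spec_glyph_output_order_acyclic
  rw [Bool.eq_iff_iff, pvA_iff, pvB_iff]
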